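-- pv_equiv track=rewrite | github.com/infestedwolf129/IWI131-Programacion | Tareas/tarea8_datos_prueba.py | puntaje_amigo
-- ===== SOURCE A (Python) =====
-- def obtener_valor_característica(características,buscada):##
--     for tupla in características:                         ##
--         caracter,puntaje = tupla                          ##
--         if caracter == buscada:                           ##
--             return puntaje                                ##
--     return 0                                              ##
--
-- def puntaje_amigo(amigo,características):                               ##
--     suma = 0                                                            ##
--     _, buscado = amigo                                                  ##
--     i = 0                                                               ##
--     while i < len(buscado):                                             ##
--         suma += obtener_valor_característica(características,buscado[i])##
--         i +=1                                                           ##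
--     return suma                                                         ##
-- ===== SOURCE B (Python) =====
-- def puntaje_amigo(amigo, características):
--     _, buscado = amigo
--     suma = 0
--     vistos = set()
--     for caracter, puntaje in características:
--         if caracter not in vistos:
--             vistos.add(caracter)
--             suma += puntaje * sum(1 for ch in buscado if ch == caracter)
--     return suma
-- ===== Notes on version B (the rewrite author's own statement) =====
-- stated objective: faster
-- what changed: B inverts the traversal: instead of scanning the table for every query character, it makes one pass over the characteristic table, skipping already-seen caracteres with a set, and adds each first-seen score times the number of its occurrences in the query string.
import Mathlib
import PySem

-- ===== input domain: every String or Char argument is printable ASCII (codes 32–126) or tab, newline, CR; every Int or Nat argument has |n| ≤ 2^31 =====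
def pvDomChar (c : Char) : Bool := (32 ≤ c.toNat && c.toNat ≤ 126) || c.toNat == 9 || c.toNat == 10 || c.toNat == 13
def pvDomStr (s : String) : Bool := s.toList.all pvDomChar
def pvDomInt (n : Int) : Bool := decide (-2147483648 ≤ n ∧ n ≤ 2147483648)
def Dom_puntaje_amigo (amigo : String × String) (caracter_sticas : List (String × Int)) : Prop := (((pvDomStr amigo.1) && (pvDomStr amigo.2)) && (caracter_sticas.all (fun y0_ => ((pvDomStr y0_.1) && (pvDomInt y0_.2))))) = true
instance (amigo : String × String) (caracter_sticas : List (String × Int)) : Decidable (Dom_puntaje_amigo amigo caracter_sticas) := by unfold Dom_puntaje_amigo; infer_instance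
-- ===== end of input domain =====

-- B inverts the traversal: one pass over the characteristic table (skipping already-seen
-- caracteres via a set), adding each first-seen score times its occurrence count in the
-- query string (objective: faster — each table entry is touched once, duplicates skipped).

-- ===== PORT A =====
-- obtener_valor_característica: first matching tuple's score, else 0
def obtener_valor (caracter_sticas : List (String × Int)) (buscada : String) : Int :=
  match caracter_sticas with
  | [] => 0
  | (caracter, puntaje) :: rest =>
      if caracter == buscada then puntaje else obtener_valor rest buscada

-- the while loop over i < len(buscado), accumulating suma; buscado[i] is a 1-char string
def puntajeLoop (caracter_sticas : List (String × Int)) (chars : List Char) (suma : Int) : Int :=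
  match chars with
  | [] => suma
  | c :: rest => puntajeLoop caracter_sticas rest (suma + obtener_valor caracter_sticas (String.ofList [c]))

def puntaje_amigo (amigo : String × String) (caracter_sticas : List (String × Int)) : Int :=
  puntajeLoop caracter_sticas amigo.2.toList 0

-- ===== PORT B =====
-- for caracter, puntaje in características: if caracter not in vistos: vistos.add; suma += puntaje * count
-- sum(1 for ch in buscado if ch == caracter) is ported as countP over buscado's characters
def altLoop (chars : List Char) (caracter_sticas : List (String × Int)) (vistos : PySem.Set String) (suma : Int) : Int :=
  match caracter_sticas with
  | [] => suma
  | (caracter, puntaje) :: rest =>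
      if PySem.Set.contains vistos caracter then altLoop chars rest vistos suma
      else altLoop chars rest (PySem.Set.add vistos caracter)
             (suma + puntaje * (chars.countP (fun ch => String.ofList [ch] == caracter) : Int))

def puntaje_amigo_alt (amigo : String × String) (caracter_sticas : List (String × Int)) : Int :=
  altLoop amigo.2.toList caracter_sticas PySem.Set.empty 0

-- ===== PRECONDITION & SPEC =====
def Spec_puntaje_amigo (amigo : String × String) (caracter_sticas : List (String × Int)) (out : Int) : Prop := out = puntaje_amigo_alt amigo caracter_sticas
instance (amigo : String × String) (caracter_sticas : List (String × Int)) (out : Int) : Decidable (Spec_puntaje_amigo amigo caracter_sticas out) := by unfold Spec_puntaje_amigo; infer_instance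

-- ===== CLAIM =====
def Claim_equal_puntaje_amigo : Prop := ∀ (amigo : String × String) (caracter_sticas : List (String × Int)), Dom_puntaje_amigo amigo caracter_sticas → Spec_puntaje_amigo amigo caracter_sticas (puntaje_amigo amigo caracter_sticas)

-- ===== LEMMAS AND PROOFS =====
-- A's loop is the sum of first-match lookups over the query characters
theorem puntajeLoop_eq (l : List (String × Int)) (chars : List Char) (suma : Int) :
    puntajeLoop l chars suma = suma + (chars.map (fun ch => obtener_valor l (String.ofList [ch]))).sum := by
  induction chars generalizing suma with
  | nil => simp [puntajeLoop]
  | cons c rest ih => simp [puntajeLoop, ih]; ring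

-- splitting a per-character sum at one key: matching characters contribute p each
theorem sum_split (chars : List Char) (c : String) (p : Int) (g : Char → Int) :
    (chars.map (fun ch => if String.ofList [ch] = c then p else g ch)).sum
      = p * (chars.countP (fun ch => String.ofList [ch] == c) : Int)
        + (chars.map (fun ch => if String.ofList [ch] = c then 0 else g ch)).sum := by
  induction chars with
  | nil => simp
  | cons ch rest ih =>
      by_cases h : String.ofList [ch] = c <;>
        simp [h, ih] <;> ring

-- invariant of B's loop: a key already in vistos contributes nothing more,
-- a fresh key contributes its first-match value
theorem altLoop_eq (chars : List Char) (l : List (String × Int)) (S : PySem.Set String) (suma : Int) :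
    altLoop chars l S suma
      = suma + (chars.map (fun ch =>
          if String.ofList [ch] ∈ S then 0
          else obtener_valor l (String.ofList [ch]))).sum := by
  induction l generalizing S suma with
  | nil =>
      simp [altLoop, obtener_valor]
  | cons hd rest ih =>
      obtain ⟨c, p⟩ := hd
      by_cases hcm : c ∈ S
      · have hc : PySem.Set.contains S c = true := (PySem.Set.contains_iff S c).mpr hcm
        rw [altLoop, if_pos hc, ih]
        congr 2
        apply List.map_congr_left
        intro ch _
        by_cases hk : String.ofList [ch] ∈ S
        · simp [hk]
        · have hne : (c == String.ofList [ch]) = false := by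
            apply beq_eq_false_iff_ne.mpr
            intro h; subst h; exact hk hcm
          simp [hk, obtener_valor, hne]
      · have hc : PySem.Set.contains S c = false := by
          by_contra h
          exact hcm ((PySem.Set.contains_iff S c).mp (by simpa using h))
        rw [altLoop, hc]
        simp only [Bool.false_eq_true, if_false]
        rw [ih]
        have eL : (chars.map (fun ch =>
            if String.ofList [ch] ∈ PySem.Set.add S c then 0
            else obtener_valor rest (String.ofList [ch])))
          = (chars.map (fun ch =>
            if String.ofList [ch] = c then 0
            else if String.ofList [ch] ∈ S then 0
            else obtener_valor rest (String.ofList [ch]))) := by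
          apply List.map_congr_left
          intro ch _
          by_cases h1 : String.ofList [ch] = c
          · simp [PySem.Set.mem_add, h1]
          · by_cases h2 : String.ofList [ch] ∈ S <;> simp [PySem.Set.mem_add, h1, h2]
        have eR : (chars.map (fun ch =>
            if String.ofList [ch] ∈ S then 0
            else obtener_valor ((c, p) :: rest) (String.ofList [ch])))
          = (chars.map (fun ch =>
            if String.ofList [ch] = c then p
            else if String.ofList [ch] ∈ S then 0
            else obtener_valor rest (String.ofList [ch]))) := by
          apply List.map_congr_left
          intro ch _
          by_cases h1 : String.ofList [ch] = c
          · subst h1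
            simp [obtener_valor, hcm]
          · have hb : (c == String.ofList [ch]) = false := by
              apply beq_eq_false_iff_ne.mpr; exact fun he => h1 he.symm
            by_cases h2 : String.ofList [ch] ∈ S <;> simp [obtener_valor, hb, h1, h2]
        rw [eL, eR, sum_split chars c p]
        ring

-- at vistos = ∅ the two per-character summands coincide
theorem combine (amigo : String × String) (l : List (String × Int)) :
    puntaje_amigo amigo l = puntaje_amigo_alt amigo l := by
  unfold puntaje_amigo puntaje_amigo_alt
  rw [puntajeLoop_eq, altLoop_eq]
  simp [PySem.Set.empty]

-- ===== VERDICT =====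
theorem puntaje_amigo_spec : Claim_equal_puntaje_amigo := by
  intro amigo l _
  unfold Spec_puntaje_amigo
  exact combine amigo l
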